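-- pv_equiv track=rewrite | github.com/PhantomGM/AIGM | core/dna_generator.py | identify_evolution_patterns
-- ===== SOURCE A (Python) =====
-- from typing import Dict, Any, List, Tuple, Optional, Union
--
-- def identify_evolution_patterns(
--                               all_traits: Dict[str, tuple],
--                               trends: Dict[str, List[str]]) -> Dict[str, str]:
--     """Identify evolution patterns for significant traits."""
--     patterns = {}
--
--     for trait, (prev, intens) in all_traits.items():
--         # High value traits tend to accelerate
--         if prev >= 7 and intens >= 4:
--             patterns[trait] = "ACCELERATING"
--         # Low value traits tend to decline
--         elif prev <= 3 and intens <= 2: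
--             patterns[trait] = "DECLINING"
--         # Moderate traits with high intensity are unstable
--         elif 4 <= prev <= 6 and intens >= 4:
--             patterns[trait] = "UNSTABLE"
--         # Moderate traits with low intensity stabilize
--         elif 4 <= prev <= 6 and intens <= 2:
--             patterns[trait] = "STABILIZING"
--
--     # Consider trends in pattern assignment
--     for rising in trends["RISING"]:
--         if rising in patterns and patterns[rising] != "ACCELERATING":
--             patterns[rising] = "ACCELERATING"
--     for falling in trends["FALLING"]:
--         if falling in patterns and patterns[falling] != "DECLINING":
--             patterns[falling] = "DECLINING"
--
--     return patterns
-- ===== SOURCE B (Python) =====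
-- def identify_evolution_patterns(all_traits, trends):
--     """Identify evolution patterns for significant traits (single fused pass)."""
--     rising = set(trends["RISING"])
--     falling = set(trends["FALLING"])
--     patterns = {}
--     for trait, (prev, intens) in all_traits.items():
--         if prev >= 7 and intens >= 4:
--             base = "ACCELERATING"
--         elif prev <= 3 and intens <= 2:
--             base = "DECLINING"
--         elif 4 <= prev <= 6 and intens >= 4:
--             base = "UNSTABLE"
--         elif 4 <= prev <= 6 and intens <= 2:
--             base = "STABILIZING"
--         else:
--             continue
--         if trait in falling:
--             patterns[trait] = "DECLINING"
--         elif trait in rising: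
--             patterns[trait] = "ACCELERATING"
--         else:
--             patterns[trait] = base
--     return patterns
-- ===== Notes on version B (the rewrite author's own statement) =====
-- stated objective: simpler
-- what changed: Replaces the three passes (threshold loop over traits, then two post-hoc override loops over the RISING and FALLING trend lists) with one fused pass over all_traits that precomputes the trend lists as sets and applies the falling-then-rising override at insertion time.
import Mathlib
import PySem

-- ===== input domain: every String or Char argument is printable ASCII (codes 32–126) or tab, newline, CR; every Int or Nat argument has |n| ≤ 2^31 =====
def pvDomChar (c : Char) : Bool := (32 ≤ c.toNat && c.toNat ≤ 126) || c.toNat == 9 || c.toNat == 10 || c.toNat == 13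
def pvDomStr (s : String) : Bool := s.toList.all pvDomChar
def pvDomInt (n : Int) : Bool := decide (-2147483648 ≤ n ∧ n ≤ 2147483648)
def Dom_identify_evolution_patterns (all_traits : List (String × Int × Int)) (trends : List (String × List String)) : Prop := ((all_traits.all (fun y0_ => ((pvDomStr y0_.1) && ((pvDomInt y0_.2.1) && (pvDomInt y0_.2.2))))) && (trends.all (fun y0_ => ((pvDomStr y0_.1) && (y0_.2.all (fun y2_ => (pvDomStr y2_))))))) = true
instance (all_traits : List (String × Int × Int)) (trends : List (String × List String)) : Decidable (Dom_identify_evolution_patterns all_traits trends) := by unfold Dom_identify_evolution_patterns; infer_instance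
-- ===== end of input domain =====

-- B fuses A's three passes (threshold classification, then a RISING and a FALLING override loop)
-- into one pass over all_traits with precomputed trend sets; objective: simpler. Same cost class.

-- ===== PORT A =====
def identify_evolution_patterns (all_traits : List (String × Int × Int)) (trends : List (String × List String)) : List (String × String) :=
  let patterns : PySem.Dict String String :=
    all_traits.foldl (fun d tpi =>
      if 7 ≤ tpi.2.1 ∧ 4 ≤ tpi.2.2 then d.insert tpi.1 "ACCELERATING"
      else if tpi.2.1 ≤ 3 ∧ tpi.2.2 ≤ 2 then d.insert tpi.1 "DECLINING"
      else if 4 ≤ tpi.2.1 ∧ tpi.2.1 ≤ 6 ∧ 4 ≤ tpi.2.2 then d.insert tpi.1 "UNSTABLE"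
      else if 4 ≤ tpi.2.1 ∧ tpi.2.1 ≤ 6 ∧ tpi.2.2 ≤ 2 then d.insert tpi.1 "STABILIZING"
      else d) PySem.Dict.empty
  -- trends["RISING"] / trends["FALLING"]: total via getD; Pre_ requires both keys (else Python raises KeyError)
  let patterns := ((PySem.Dict.ofList trends).getD "RISING" []).foldl (fun d r =>
      match d.get? r with
      | some v => if v ≠ "ACCELERATING" then d.insert r "ACCELERATING" else d
      | none => d) patterns
  let patterns := ((PySem.Dict.ofList trends).getD "FALLING" []).foldl (fun d f =>
      match d.get? f with
      | some v => if v ≠ "DECLINING" then d.insert f "DECLINING" else d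
      | none => d) patterns
  patterns.items

-- ===== PORT B =====
def pvClassify (prev intens : Int) : Option String :=
  if 7 ≤ prev ∧ 4 ≤ intens then some "ACCELERATING"
  else if prev ≤ 3 ∧ intens ≤ 2 then some "DECLINING"
  else if 4 ≤ prev ∧ prev ≤ 6 ∧ 4 ≤ intens then some "UNSTABLE"
  else if 4 ≤ prev ∧ prev ≤ 6 ∧ intens ≤ 2 then some "STABILIZING"
  else none

def identify_evolution_patterns_alt (all_traits : List (String × Int × Int)) (trends : List (String × List String)) : List (String × String) :=
  let rising : PySem.Set String := PySem.Set.ofList ((PySem.Dict.ofList trends).getD "RISING" [])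
  let falling : PySem.Set String := PySem.Set.ofList ((PySem.Dict.ofList trends).getD "FALLING" [])
  (all_traits.foldl (fun (d : PySem.Dict String String) tpi =>
      match pvClassify tpi.2.1 tpi.2.2 with
      | none => d
      | some base => d.insert tpi.1
          (if tpi.1 ∈ falling then "DECLINING"
           else if tpi.1 ∈ rising then "ACCELERATING"
           else base)) PySem.Dict.empty).items

-- ===== PRECONDITION & SPEC =====
-- Python A raises KeyError unless trends has both the "RISING" and the "FALLING" key.
def Pre_identify_evolution_patterns (all_traits : List (String × Int × Int)) (trends : List (String × List String)) : Prop :=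
  "RISING" ∈ trends.map Prod.fst ∧ "FALLING" ∈ trends.map Prod.fst
instance (all_traits : List (String × Int × Int)) (trends : List (String × List String)) : Decidable (Pre_identify_evolution_patterns all_traits trends) := by unfold Pre_identify_evolution_patterns; infer_instance
def pvWitness_identify_evolution_patterns : (List (String × Int × Int)) × (List (String × List String)) :=
  ([("valor", 8, 5), ("greed", 2, 1)], [("RISING", ["greed"]), ("FALLING", [])])

def Spec_identify_evolution_patterns (all_traits : List (String × Int × Int)) (trends : List (String × List String)) (out : List (String × String)) : Prop := out = identify_evolution_patterns_alt all_traits trends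
instance (all_traits : List (String × Int × Int)) (trends : List (String × List String)) (out : List (String × String)) : Decidable (Spec_identify_evolution_patterns all_traits trends out) := by unfold Spec_identify_evolution_patterns; infer_instance

-- ===== CLAIM (what is proved, stated in full; the proofs are below) =====
def Claim_equal_identify_evolution_patterns : Prop := ∀ (all_traits : List (String × Int × Int)) (trends : List (String × List String)), Dom_identify_evolution_patterns all_traits trends → Pre_identify_evolution_patterns all_traits trends → Spec_identify_evolution_patterns all_traits trends (identify_evolution_patterns all_traits trends)

-- ===== LEMMAS AND PROOFS =====

-- the override A's two trailing loops (FALLING after RISING) end up applying to each stored pattern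
def pvOv (rsL fsL : List String) (p : String × String) : String × String :=
  if p.1 ∈ fsL then (p.1, "DECLINING") else if p.1 ∈ rsL then (p.1, "ACCELERATING") else p

theorem pvOv_fst (rsL fsL : List String) (p : String × String) : (pvOv rsL fsL p).1 = p.1 := by
  unfold pvOv; split_ifs <;> rfl

theorem pv_keys_mk_map (f : String × String → String × String)
    (hf : ∀ p, (f p).1 = p.1) (xs : List (String × String)) :
    (PySem.Dict.mk (xs.map f) : PySem.Dict String String).keys = (PySem.Dict.mk xs : PySem.Dict String String).keys := by
  simp only [PySem.Dict.keys, List.map_map]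
  exact List.map_congr_left (fun p _ => hf p)

-- one override loop of A equals a value-map over the items
theorem pv_ov_fold (c : String) (l : List String) :
    ∀ (d : PySem.Dict String String), d.keys.Nodup →
    l.foldl (fun d r =>
      match d.get? r with
      | some v => if v ≠ c then d.insert r c else d
      | none => d) d
    = PySem.Dict.mk (d.items.map (fun p => if p.1 ∈ l then (p.1, c) else p)) := by
  induction l with
  | nil =>
    intro d _
    simp
  | cons r l ih =>
    intro d hnd
    have hstep_items : (match d.get? r with
        | some v => if v ≠ c then d.insert r c else d
        | none => d).items = d.items.map (fun p => if p.1 = r then (p.1, c) else p) := by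
      cases hg : d.get? r with
      | none =>
        have hr : r ∉ d.keys := (PySem.Dict.get?_eq_none_iff_not_mem_keys d r).mp hg
        symm
        calc d.items.map (fun p => if p.1 = r then (p.1, c) else p)
            = d.items.map id := List.map_congr_left (fun p hp => by
              have hne : p.1 ≠ r := fun h =>
                hr (by simpa [PySem.Dict.keys, h] using List.mem_map_of_mem hp (f := Prod.fst))
              simp [hne])
          _ = d.items := List.map_id d.items
      | some v =>
        by_cases hv : v = c
        · show (if v ≠ c then d.insert r c else d).items = _
          rw [if_neg (by simp [hv])]
          symm
          calc d.items.map (fun p => if p.1 = r then (p.1, c) else p)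
              = d.items.map id := List.map_congr_left (fun p hp => by
                by_cases hpr : p.1 = r
                · obtain ⟨p1, p2⟩ := p
                  simp only at hpr
                  subst hpr
                  have h2 := (PySem.Dict.get?_eq_some_iff_mem_items d p1 p2 hnd).mpr hp
                  rw [hg] at h2
                  have hpv : v = p2 := Option.some.inj h2
                  simp [← hpv, hv]
                · simp [hpr])
            _ = d.items := List.map_id d.items
        · show (if v ≠ c then d.insert r c else d).items = _
          rw [if_pos hv]
          rw [PySem.Dict.items_insert_of_contains d c
            (by rw [PySem.Dict.contains_eq_isSome_get?, hg]; rfl)]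
          refine List.map_congr_left (fun p _ => ?_)
          by_cases hpr : p.1 = r <;> simp [hpr]
    have hnd1 : (match d.get? r with
        | some v => if v ≠ c then d.insert r c else d
        | none => d).keys.Nodup := by
      simp only [PySem.Dict.keys, hstep_items, List.map_map] at *
      have heq : d.items.map ((fun q : String × String => q.1) ∘ fun p => if p.1 = r then (p.1, c) else p)
          = d.items.map (fun q => q.1) := List.map_congr_left (fun p _ => by
            by_cases h : p.1 = r <;> simp [h])
      rw [heq]
      exact hnd
    rw [List.foldl_cons]
    rw [ih _ hnd1, hstep_items]
    apply PySem.Dict.ext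
    simp only [List.map_map]
    refine List.map_congr_left (fun p _ => ?_)
    by_cases h1 : p.1 = r <;> by_cases h2 : p.1 ∈ l <;>
      simp [Function.comp, h1, h2]

-- A's threshold step is classification-then-conditional-insert
theorem pv_stepA_eq (d : PySem.Dict String String) (tpi : String × Int × Int) :
    (if 7 ≤ tpi.2.1 ∧ 4 ≤ tpi.2.2 then d.insert tpi.1 "ACCELERATING"
     else if tpi.2.1 ≤ 3 ∧ tpi.2.2 ≤ 2 then d.insert tpi.1 "DECLINING"
     else if 4 ≤ tpi.2.1 ∧ tpi.2.1 ≤ 6 ∧ 4 ≤ tpi.2.2 then d.insert tpi.1 "UNSTABLE"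
     else if 4 ≤ tpi.2.1 ∧ tpi.2.1 ≤ 6 ∧ tpi.2.2 ≤ 2 then d.insert tpi.1 "STABILIZING"
     else d)
    = (match pvClassify tpi.2.1 tpi.2.2 with
       | none => d
       | some base => d.insert tpi.1 base) := by
  unfold pvClassify
  split_ifs <;> rfl

-- A's build loop keeps keys Nodup
theorem pv_nodup_buildA (ts : List (String × Int × Int)) :
    ∀ (d : PySem.Dict String String), d.keys.Nodup →
    (ts.foldl (fun d tpi =>
      if 7 ≤ tpi.2.1 ∧ 4 ≤ tpi.2.2 then d.insert tpi.1 "ACCELERATING"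
      else if tpi.2.1 ≤ 3 ∧ tpi.2.2 ≤ 2 then d.insert tpi.1 "DECLINING"
      else if 4 ≤ tpi.2.1 ∧ tpi.2.1 ≤ 6 ∧ 4 ≤ tpi.2.2 then d.insert tpi.1 "UNSTABLE"
      else if 4 ≤ tpi.2.1 ∧ tpi.2.1 ≤ 6 ∧ tpi.2.2 ≤ 2 then d.insert tpi.1 "STABILIZING"
      else d) d).keys.Nodup := by
  induction ts with
  | nil => intro d hnd; simpa using hnd
  | cons t ts ih =>
    intro d hnd
    rw [List.foldl_cons]
    apply ih
    split_ifs <;> first | exact PySem.Dict.nodup_keys_insert d _ _ hnd | exact hnd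

-- B's fused loop commutes with applying pvOv to the items of A's build loop
theorem pv_fuse (rsL fsL : List String) (ts : List (String × Int × Int)) :
    ∀ (d : PySem.Dict String String),
    ts.foldl (fun (d : PySem.Dict String String) tpi =>
      match pvClassify tpi.2.1 tpi.2.2 with
      | none => d
      | some base => d.insert tpi.1
          (if tpi.1 ∈ PySem.Set.ofList fsL then "DECLINING"
           else if tpi.1 ∈ PySem.Set.ofList rsL then "ACCELERATING"
           else base)) (PySem.Dict.mk (d.items.map (pvOv rsL fsL)))
    = PySem.Dict.mk ((ts.foldl (fun d tpi =>
      if 7 ≤ tpi.2.1 ∧ 4 ≤ tpi.2.2 then d.insert tpi.1 "ACCELERATING"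
      else if tpi.2.1 ≤ 3 ∧ tpi.2.2 ≤ 2 then d.insert tpi.1 "DECLINING"
      else if 4 ≤ tpi.2.1 ∧ tpi.2.1 ≤ 6 ∧ 4 ≤ tpi.2.2 then d.insert tpi.1 "UNSTABLE"
      else if 4 ≤ tpi.2.1 ∧ tpi.2.1 ≤ 6 ∧ tpi.2.2 ≤ 2 then d.insert tpi.1 "STABILIZING"
      else d) d).items.map (pvOv rsL fsL)) := by
  induction ts with
  | nil => intro d; rfl
  | cons t ts ih =>
    intro d
    rw [List.foldl_cons, List.foldl_cons, pv_stepA_eq]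
    cases hc : pvClassify t.2.1 t.2.2 with
    | none => exact ih d
    | some base =>
      have hkeys := pv_keys_mk_map (pvOv rsL fsL) (pvOv_fst rsL fsL) d.items
      have hcon : (PySem.Dict.mk (d.items.map (pvOv rsL fsL)) : PySem.Dict String String).contains t.1
          = d.contains t.1 := by
        rw [PySem.Dict.contains_eq_decide_mem_keys, PySem.Dict.contains_eq_decide_mem_keys, hkeys]
      have hins : (PySem.Dict.mk (d.items.map (pvOv rsL fsL)) : PySem.Dict String String).insert t.1
            (if t.1 ∈ PySem.Set.ofList fsL then "DECLINING"
             else if t.1 ∈ PySem.Set.ofList rsL then "ACCELERATING"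
             else base)
          = PySem.Dict.mk ((d.insert t.1 base).items.map (pvOv rsL fsL)) := by
        have hov : (pvOv rsL fsL (t.1, base))
            = (t.1, (if t.1 ∈ PySem.Set.ofList fsL then "DECLINING"
                     else if t.1 ∈ PySem.Set.ofList rsL then "ACCELERATING"
                     else base)) := by
          unfold pvOv
          simp only [PySem.Set.mem_ofList]
          split_ifs <;> rfl
        apply PySem.Dict.ext
        by_cases h : d.contains t.1 = true
        · rw [PySem.Dict.items_insert_of_contains _ _ (by rw [hcon]; exact h),
              PySem.Dict.items_insert_of_contains _ _ h]
          simp only [List.map_map]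
          refine List.map_congr_left (fun p _ => ?_)
          by_cases hp : p.1 = t.1
          · simp [Function.comp, pvOv_fst, hp, hov]
          · simp [Function.comp, pvOv_fst, hp]
        · have h' : d.contains t.1 = false := by simpa using h
          rw [PySem.Dict.items_insert_of_not_contains _ _ (by rw [hcon]; exact h'),
              PySem.Dict.items_insert_of_not_contains _ _ h']
          simp [hov]
      have hrest := ih (d.insert t.1 base)
      rw [← hins] at hrest
      exact hrest

-- ===== VERDICT (by name: the statement is the Claim_ definition above) =====
theorem identify_evolution_patterns_spec : Claim_equal_identify_evolution_patterns := by
  intro all_traits trends _ _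
  unfold Spec_identify_evolution_patterns
  simp only [identify_evolution_patterns, identify_evolution_patterns_alt]
  set rsL := (PySem.Dict.ofList trends).getD "RISING" ([] : List String) with hrs
  set fsL := (PySem.Dict.ofList trends).getD "FALLING" ([] : List String) with hfs
  set B0 := all_traits.foldl (fun d tpi =>
      if 7 ≤ tpi.2.1 ∧ 4 ≤ tpi.2.2 then d.insert tpi.1 "ACCELERATING"
      else if tpi.2.1 ≤ 3 ∧ tpi.2.2 ≤ 2 then d.insert tpi.1 "DECLINING"
      else if 4 ≤ tpi.2.1 ∧ tpi.2.1 ≤ 6 ∧ 4 ≤ tpi.2.2 then d.insert tpi.1 "UNSTABLE"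
      else if 4 ≤ tpi.2.1 ∧ tpi.2.1 ≤ 6 ∧ tpi.2.2 ≤ 2 then d.insert tpi.1 "STABILIZING"
      else d) PySem.Dict.empty with hB0
  have hnd0 : B0.keys.Nodup := by
    rw [hB0]; exact pv_nodup_buildA all_traits PySem.Dict.empty (by simp)
  rw [pv_ov_fold "ACCELERATING" rsL B0 hnd0]
  have hndR : (PySem.Dict.mk (B0.items.map (fun p => if p.1 ∈ rsL then (p.1, "ACCELERATING") else p)) : PySem.Dict String String).keys.Nodup := by
    rw [pv_keys_mk_map _ (fun p => by by_cases h : p.1 ∈ rsL <;> simp [h]) B0.items]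
    exact hnd0
  rw [pv_ov_fold "DECLINING" fsL _ hndR]
  have hcomp : (B0.items.map (fun p => if p.1 ∈ rsL then (p.1, "ACCELERATING") else p)).map
      (fun p => if p.1 ∈ fsL then (p.1, "DECLINING") else p) = B0.items.map (pvOv rsL fsL) := by
    simp only [List.map_map]
    refine List.map_congr_left (fun p _ => ?_)
    unfold pvOv
    by_cases h1 : p.1 ∈ rsL <;> by_cases h2 : p.1 ∈ fsL <;>
      simp [Function.comp, h1, h2]
  have hmain := pv_fuse rsL fsL all_traits PySem.Dict.empty
  rw [← hB0] at hmain
  rw [hcomp]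
  exact (congrArg PySem.Dict.items hmain).symm
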